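-- pv_equiv track=rewrite | github.com/gkeksd/programing-source-project | 파이썬/포커.py | check_dup_values
-- ===== SOURCE A (Python) =====
-- def check_dup_values(player_hand):
-- 	values_list = []
-- 	for card in player_hand:
-- 		values_list.append(card[0])
--
-- 	counted_values = []
-- 	already_checked_value = []
-- 	for value in values_list:
-- 		if value not in already_checked_value:
-- 			already_checked_value.append(value)
-- 			if values_list.count(value) == 2:
-- 				counted_values.append([value, 2])
-- 			if values_list.count(value) == 3:
-- 				counted_values.append([value, 3])
-- 			if values_list.count(value) == 4:
-- 				counted_values.append([value, 4])
--
-- 	return counted_values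
-- ===== SOURCE B (Python) =====
-- def check_dup_values(player_hand):
-- 	counts = {}
-- 	for card in player_hand:
-- 		counts[card[0]] = counts.get(card[0], 0) + 1
-- 	result = []
-- 	for value, cnt in counts.items():
-- 		if 2 <= cnt <= 4:
-- 			result.append([value, cnt])
-- 	return result
-- ===== Notes on version B (the rewrite author's own statement) =====
-- stated objective: faster
-- what changed: Replaces the seen-list dedup with its three repeated full-list .count() scans per distinct value by a single-pass dict frequency table followed by one pass over its items.
import Mathlib
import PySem

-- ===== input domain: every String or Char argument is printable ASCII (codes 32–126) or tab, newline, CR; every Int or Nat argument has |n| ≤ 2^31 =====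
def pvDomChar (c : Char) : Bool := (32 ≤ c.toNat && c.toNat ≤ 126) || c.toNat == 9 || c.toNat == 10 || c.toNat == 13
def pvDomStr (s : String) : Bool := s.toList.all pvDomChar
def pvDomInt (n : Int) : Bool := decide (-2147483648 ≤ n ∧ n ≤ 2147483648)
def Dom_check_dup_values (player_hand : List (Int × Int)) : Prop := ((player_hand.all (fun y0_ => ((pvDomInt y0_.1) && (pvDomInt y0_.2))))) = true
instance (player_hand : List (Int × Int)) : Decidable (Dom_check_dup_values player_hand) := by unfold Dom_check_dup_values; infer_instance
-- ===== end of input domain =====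

-- B replaces A's seen-list dedup plus three repeated full-list count scans per distinct value
-- by a one-pass dict frequency table followed by one pass over its items (faster: O(n^2) -> O(n)).


-- ===== PORT A =====
-- loop body of A's second for-loop: dedup via the already_checked list, then the three count checks
def aStep (values_list : List Int) (st : List (List Int) × List Int) (value : Int) :
    List (List Int) × List Int :=
  if value ∈ st.2 then st
  else
    let checked := st.2 ++ [value]
    let counted := if PySem.List.count values_list value = 2 then st.1 ++ [[value, 2]] else st.1
    let counted := if PySem.List.count values_list value = 3 then counted ++ [[value, 3]] else counted
    let counted := if PySem.List.count values_list value = 4 then counted ++ [[value, 4]] else counted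
    (counted, checked)

def check_dup_values (player_hand : List (Int × Int)) : List (List Int) :=
  let values_list := player_hand.foldl (fun acc card => acc ++ [card.1]) []
  (values_list.foldl (aStep values_list) ([], [])).1

-- ===== PORT B =====
def check_dup_values_alt (player_hand : List (Int × Int)) : List (List Int) :=
  let counts := player_hand.foldl
    (fun (d : PySem.Dict Int Int) card => d.insert card.1 (d.getD card.1 0 + 1)) PySem.Dict.empty
  counts.items.foldl
    (fun res p => if 2 ≤ p.2 ∧ p.2 ≤ 4 then res ++ [[p.1, p.2]] else res) []

-- ===== PRECONDITION & SPEC =====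
def Spec_check_dup_values (player_hand : List (Int × Int)) (out : List (List Int)) : Prop := out = check_dup_values_alt player_hand
instance (player_hand : List (Int × Int)) (out : List (List Int)) : Decidable (Spec_check_dup_values player_hand out) := by unfold Spec_check_dup_values; infer_instance

-- ===== CLAIM (what is proved, stated in full; the proofs are below) =====
def Claim_equal_check_dup_values : Prop := ∀ (player_hand : List (Int × Int)), Dom_check_dup_values player_hand → Spec_check_dup_values player_hand (check_dup_values player_hand)

-- ===== LEMMAS AND PROOFS =====

-- the distinct elements of l not already in ch, in first-appearance order
def newVals : List Int → List Int → List Int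
  | _, [] => []
  | ch, v :: r => if v ∈ ch then newVals ch r else v :: newVals (ch ++ [v]) r

-- what both programs emit for one distinct value v
def emit (vs : List Int) (v : Int) : List (List Int) :=
  if 2 ≤ List.count v vs ∧ List.count v vs ≤ 4 then [[v, (List.count v vs : Int)]] else []

theorem foldl_add_eq_newVals (l s : List Int) :
    List.foldl PySem.Set.add s l = s ++ newVals s l := by
  induction l generalizing s with
  | nil => simp [newVals]
  | cons v r ih =>
    by_cases hv : v ∈ s <;>
      simp [newVals, PySem.Set.add, hv, List.foldl_cons, ih]

theorem aloop_eq (vs rest ch : List Int) (acc : List (List Int)) :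
    List.foldl (aStep vs) (acc, ch) rest
      = (acc ++ (newVals ch rest).flatMap (emit vs), ch ++ newVals ch rest) := by
  induction rest generalizing ch acc with
  | nil => simp [newVals]
  | cons v r ih =>
    by_cases hv : v ∈ ch
    · simp [newVals, aStep, hv, ih]
    · have hstep : aStep vs (acc, ch) v = (acc ++ emit vs v, ch ++ [v]) := by
        by_cases h2 : List.count v vs = 2
        · simp [aStep, hv, emit, h2]
        · by_cases h3 : List.count v vs = 3
          · simp [aStep, hv, emit, h3]
          · by_cases h4 : List.count v vs = 4
            · simp [aStep, hv, emit, h4]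
            · have : ¬ (2 ≤ List.count v vs ∧ List.count v vs ≤ 4) := by omega
              simp [aStep, hv, emit, h2, h3, h4, this]
      rw [List.foldl_cons, hstep, ih]
      simp [newVals, hv]

theorem bfilter_eq (vs ks : List Int) (acc : List (List Int)) :
    List.foldl (fun res (p : Int × Int) => if 2 ≤ p.2 ∧ p.2 ≤ 4 then res ++ [[p.1, p.2]] else res)
        acc (ks.map (fun k => (k, (List.count k vs : Int))))
      = acc ++ ks.flatMap (emit vs) := by
  induction ks generalizing acc with
  | nil => simp
  | cons k r ih =>
    by_cases h : 2 ≤ List.count k vs ∧ List.count k vs ≤ 4 <;>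
      simp [List.map_cons, List.foldl_cons, h, ih, emit]

theorem bdict_eq (player_hand : List (Int × Int)) :
    player_hand.foldl
        (fun (d : PySem.Dict Int Int) card => d.insert card.1 (d.getD card.1 0 + 1))
        PySem.Dict.empty
      = PySem.Dict.counter (player_hand.map (·.1)) := by
  rw [PySem.Dict.counter, List.foldl_map]
  rfl

-- ===== VERDICT (by name: the statement is the Claim_ definition above) =====
theorem check_dup_values_spec : Claim_equal_check_dup_values := by
  intro player_hand _
  unfold Spec_check_dup_values check_dup_values check_dup_values_alt
  simp only [PySem.List.foldl_append_singleton_eq_map, List.nil_append, bdict_eq,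
    PySem.Dict.items_counter]
  rw [bfilter_eq, aloop_eq]
  simp [PySem.Set.ofList, foldl_add_eq_newVals, PySem.Set.empty]
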